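-- pv_equiv track=rewrite | github.com/okku0916/Rubiks-Cube-Solver | preparation_tpa.py | index_to_orientation
-- ===== SOURCE A (Python) =====
-- def index_to_orientation(index, is_edge):
--     if is_edge:
--         base = 2
--         n = 11
--     else:
--         base = 3
--         n = 7
--     orientation = [0] * (n + 1)  # 向きの配列を初期化
--     sum = 0
--     for i in range(n - 1, -1, -1):  # n-1から0までループ
--         orientation[i] = index % base
--         index //= base  # indexをbaseで割った商
--         sum += orientation[i]  # 向きの合計を計算
--     if is_edge:
--         orientation[-1] = (2 - sum % 2) % 2  # エッジの向きは最後の１つで決まる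
--     else:
--         orientation[-1] = (3 - sum % 3) % 3 # コーナーの向きは最後の１つで決まる
--     return orientation
-- ===== SOURCE B (Python) =====
-- def index_to_orientation(index, is_edge):
--     base, n = (2, 11) if is_edge else (3, 7)
--     orientation = [(index // base ** (n - 1 - i)) % base for i in range(n)]
--     orientation.append((-sum(orientation)) % base)
--     return orientation
-- ===== Notes on version B (the rewrite author's own statement) =====
-- stated objective: alternative
-- what changed: Replaces the sequential loop carrying a running quotient (index //= base) and a running sum with independent direct digit extraction (index // base**(n-1-i)) % base per position plus a closed-form check digit (-sum) % base appended once.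
import Mathlib
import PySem

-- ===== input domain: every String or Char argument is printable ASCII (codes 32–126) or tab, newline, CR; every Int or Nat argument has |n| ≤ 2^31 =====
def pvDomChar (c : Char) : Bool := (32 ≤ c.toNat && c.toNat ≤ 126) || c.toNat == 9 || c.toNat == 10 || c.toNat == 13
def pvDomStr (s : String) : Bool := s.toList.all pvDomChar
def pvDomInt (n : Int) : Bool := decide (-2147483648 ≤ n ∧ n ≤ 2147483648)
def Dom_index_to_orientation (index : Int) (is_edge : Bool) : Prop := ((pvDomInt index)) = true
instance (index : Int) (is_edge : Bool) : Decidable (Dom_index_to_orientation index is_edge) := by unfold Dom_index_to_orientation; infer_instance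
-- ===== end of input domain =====

-- B replaces A's sequential running-quotient loop with independent per-digit extraction and a closed-form check digit (alternative decomposition, same cost).

-- ===== PORT A =====
def index_to_orientation (index : Int) (is_edge : Bool) : List Int :=
  let base : Int := if is_edge then 2 else 3
  let n : Int := if is_edge then 11 else 7
  let orientation : List Int := List.replicate (n.toNat + 1) 0
  -- for i in range(n-1, -1, -1): orientation[i] = index % base; index //= base; sum += orientation[i]
  let st := (PySem.List.pyRange (n - 1) (-1) (-1)).foldl
    (fun (st : List Int × Int × Int) i =>
      let d := PySem.Int.mod st.2.2 base
      (st.1.set i.toNat d, st.2.1 + d, PySem.Int.floordiv st.2.2 base))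
    (orientation, 0, index)
  -- orientation[-1] = (2 - sum % 2) % 2  resp.  (3 - sum % 3) % 3   (position -1 = index n)
  if is_edge then
    st.1.set n.toNat (PySem.Int.mod (2 - PySem.Int.mod st.2.1 2) 2)
  else
    st.1.set n.toNat (PySem.Int.mod (3 - PySem.Int.mod st.2.1 3) 3)

-- ===== PORT B =====
def index_to_orientation_alt (index : Int) (is_edge : Bool) : List Int :=
  let base : Int := if is_edge then 2 else 3
  let n : Nat := if is_edge then 11 else 7
  let orientation := (List.range n).map
    (fun i => PySem.Int.mod (PySem.Int.floordiv index (base ^ (n - 1 - i))) base)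
  orientation ++ [PySem.Int.mod (-orientation.sum) base]

-- ===== PRECONDITION & SPEC =====
def Spec_index_to_orientation (index : Int) (is_edge : Bool) (out : List Int) : Prop := out = index_to_orientation_alt index is_edge
instance (index : Int) (is_edge : Bool) (out : List Int) : Decidable (Spec_index_to_orientation index is_edge out) := by unfold Spec_index_to_orientation; infer_instance

-- ===== CLAIM (what is proved, stated in full; the proofs are below) =====
def Claim_equal_index_to_orientation : Prop := ∀ (index : Int) (is_edge : Bool), Dom_index_to_orientation index is_edge → Spec_index_to_orientation index is_edge (index_to_orientation index is_edge)

-- ===== LEMMAS AND PROOFS =====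

theorem pvRange_edge : PySem.List.pyRange 10 (-1) (-1) = [10,9,8,7,6,5,4,3,2,1,0] := by decide

theorem pvRange_corner : PySem.List.pyRange 6 (-1) (-1) = [6,5,4,3,2,1,0] := by decide

-- ===== VERDICT (by name: the statement is the Claim_ definition above) =====
theorem index_to_orientation_spec : Claim_equal_index_to_orientation := by
  intro index is_edge _
  unfold Spec_index_to_orientation index_to_orientation index_to_orientation_alt
  cases is_edge
  all_goals
    simp only [Bool.false_eq_true, if_false, if_true]
    norm_num only
  · rw [pvRange_corner]
    simp only [List.foldl, List.range, List.range.loop, List.map, List.sum_cons, List.sum_nil,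
      List.replicate, List.set, Int.toNat]
    norm_num [PySem.Int.mod_eq_emod_of_pos, PySem.Int.floordiv_eq_ediv_of_pos,
      Int.ediv_ediv_of_nonneg]
    omega
  · rw [pvRange_edge]
    simp only [List.foldl, List.range, List.range.loop, List.map, List.sum_cons, List.sum_nil,
      List.replicate, List.set, Int.toNat]
    norm_num [PySem.Int.mod_eq_emod_of_pos, PySem.Int.floordiv_eq_ediv_of_pos,
      Int.ediv_ediv_of_nonneg]
    omega
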